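-- pv_equiv track=rewrite | github.com/Mmaaeel/PROJET-S4-MPCI-nano-lamines | pré_traitement_fichier_csv.py | get_nom_colonne
-- ===== SOURCE A (Python) =====
-- def get_nom_colonne(reader):
--     liste_nom = []
--     compteur_ligne = 0
--     for ligne in reader:
--         compteur_ligne += 1
--         if compteur_ligne == 3:
--             for char in ligne:
--                 liste_nom.append(char)
--     return liste_nom[1:]
-- ===== SOURCE B (Python) =====
-- def get_nom_colonne(reader):
--     rows = list(reader)
--     return list(rows[2])[1:] if len(rows) >= 3 else []
-- ===== Notes on version B (the rewrite author's own statement) =====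
-- stated objective: simpler
-- what changed: Replaces the line counter and the per-element append loop with materializing the rows once and directly indexing/slicing the third row (rows[2])[1:], guarded by a length check.
import Mathlib
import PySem

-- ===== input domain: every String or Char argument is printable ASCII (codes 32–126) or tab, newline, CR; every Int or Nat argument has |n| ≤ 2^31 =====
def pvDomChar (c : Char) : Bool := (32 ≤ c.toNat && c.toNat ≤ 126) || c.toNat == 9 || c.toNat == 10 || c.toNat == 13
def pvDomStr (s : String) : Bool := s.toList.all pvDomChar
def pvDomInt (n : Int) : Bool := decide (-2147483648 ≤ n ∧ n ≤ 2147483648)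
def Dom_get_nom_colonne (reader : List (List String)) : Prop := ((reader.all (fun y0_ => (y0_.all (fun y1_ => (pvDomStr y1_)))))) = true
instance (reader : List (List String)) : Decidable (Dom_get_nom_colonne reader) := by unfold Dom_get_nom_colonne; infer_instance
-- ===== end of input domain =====

-- B replaces A's line counter and per-element append loop with a direct index/slice of the third row (simpler; same cost).

-- ===== PORT A =====
-- one loop iteration of A: bump the counter, and on line 3 append every element
def pvStepA (st : List String × Int) (ligne : List String) : List String × Int :=
  let compteur := st.2 + 1
  let liste := if compteur == 3 then ligne.foldl (fun acc ch => acc ++ [ch]) st.1 else st.1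
  (liste, compteur)

def get_nom_colonne (reader : List (List String)) : List String :=
  let st := reader.foldl pvStepA ([], (0 : Int))
  PySem.List.slice st.1 (some 1) none

-- ===== PORT B =====
def get_nom_colonne_alt (reader : List (List String)) : List String :=
  let rows := reader
  if 3 ≤ rows.length then PySem.List.slice (rows.getD 2 []) (some 1) none else []

-- ===== PRECONDITION & SPEC =====
def Spec_get_nom_colonne (reader : List (List String)) (out : List String) : Prop := out = get_nom_colonne_alt reader
instance (reader : List (List String)) (out : List String) : Decidable (Spec_get_nom_colonne reader out) := by unfold Spec_get_nom_colonne; infer_instance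

-- ===== CLAIM (what is proved, stated in full; the proofs are below) =====
def Claim_equal_get_nom_colonne : Prop := ∀ (reader : List (List String)), Dom_get_nom_colonne reader → Spec_get_nom_colonne reader (get_nom_colonne reader)

-- ===== LEMMAS AND PROOFS =====
theorem pv_after_three (rest : List (List String)) (acc : List String) (n : Int) (hn : 3 ≤ n) :
    (rest.foldl pvStepA (acc, n)).1 = acc := by
  induction rest generalizing n with
  | nil => rfl
  | cons x xs ih =>
      have h : (n + 1 == 3) = false := by
        rw [beq_eq_false_iff_ne]; omega
      simp only [List.foldl, pvStepA, h]
      exact ih (n + 1) (by omega)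

theorem pv_flatten_singleton (l : List String) :
    (List.map (fun x => ([x] : List String)) l).flatten = l := by
  induction l with
  | nil => rfl
  | cons x xs ih => simp [ih]

-- ===== VERDICT (by name: the statement is the Claim_ definition above) =====
theorem get_nom_colonne_spec : Claim_equal_get_nom_colonne := by
  intro reader _
  unfold Spec_get_nom_colonne get_nom_colonne get_nom_colonne_alt
  match reader with
  | [] => rfl
  | [a] => rfl
  | [a, b] => rfl
  | a :: b :: c :: rest =>
      simp only [List.foldl, pvStepA]
      norm_num
      rw [pv_after_three rest _ 3 (by omega), pv_flatten_singleton]
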